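-- pv_equiv track=rewrite | github.com/Jaimeen235/CS00-Python | HW10_JaimeenSharma.py | shareOneLetter
-- ===== SOURCE A (Python) =====
-- def shareOneLetter(wordList):
--     dictionary = {}
--     for word in wordList:
--         if word not in dictionary.keys():
--             dictionary[word] = []
--
--     for key in dictionary.keys():
--         for char in key:
--             for word in wordList:
--                 if char in word and word not in dictionary[key]:
--                     dictionary[key].append(word)
--
--     return dictionary
-- ===== SOURCE B (Python) =====
-- def shareOneLetter(wordList):
--     # Precompute a char -> words index over the distinct words, then walk it per key.
--     words = list(dict.fromkeys(wordList))
--     index = {}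
--     for w in words:
--         for c in dict.fromkeys(w):
--             index.setdefault(c, []).append(w)
--     result = {}
--     for key in words:
--         out = []
--         seen = set()
--         for c in key:
--             for w in index.get(c, []):
--                 if w not in seen:
--                     seen.add(w)
--                     out.append(w)
--         result[key] = out
--     return result
-- ===== Notes on version B (the rewrite author's own statement) =====
-- stated objective: faster
-- what changed: Replaces the per-key-per-char rescan of the whole word list (with a list-membership dedup) by a precomputed char->words index over the distinct words, walked once per key with a set-based dedup.
import Mathlib
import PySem

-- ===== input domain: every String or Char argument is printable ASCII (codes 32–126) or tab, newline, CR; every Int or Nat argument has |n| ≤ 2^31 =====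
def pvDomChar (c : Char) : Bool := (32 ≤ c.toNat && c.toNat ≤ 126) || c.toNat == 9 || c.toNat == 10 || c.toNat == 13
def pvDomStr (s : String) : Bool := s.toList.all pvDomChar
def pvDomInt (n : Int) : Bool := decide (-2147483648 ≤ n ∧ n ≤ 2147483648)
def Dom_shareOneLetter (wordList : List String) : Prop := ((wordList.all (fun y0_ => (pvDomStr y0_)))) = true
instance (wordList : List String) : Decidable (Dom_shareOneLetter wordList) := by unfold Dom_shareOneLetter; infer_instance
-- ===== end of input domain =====

-- B replaces A's per-key-per-char rescan of the whole word list by a precomputed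
-- char -> words index over the distinct words, walked once per key with a set-based
-- dedup (objective: faster).

-- ===== PORT A =====
-- phase 1 step: 'if word not in dictionary.keys(): dictionary[word] = []'
def pvA_step1 (d : PySem.Dict String (List String)) (word : String) :
    PySem.Dict String (List String) :=
  if d.keys.contains word then d else d.insert word []

-- innermost step: 'if char in word and word not in dictionary[key]: dictionary[key].append(word)'
def pvA_stepW (key : String) (char : Char) (d : PySem.Dict String (List String))
    (word : String) : PySem.Dict String (List String) :=
  if word.toList.contains char && !((d.getD key []).contains word) then
    d.insert key ((d.getD key []) ++ [word])
  else d

-- 'for word in wordList: …' for one char of one key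
def pvA_stepC (wordList : List String) (key : String)
    (d : PySem.Dict String (List String)) (char : Char) :
    PySem.Dict String (List String) :=
  wordList.foldl (pvA_stepW key char) d

-- 'for char in key: …' for one key
def pvA_stepK (wordList : List String) (d : PySem.Dict String (List String))
    (key : String) : PySem.Dict String (List String) :=
  key.toList.foldl (pvA_stepC wordList key) d

def shareOneLetter (wordList : List String) : List (String × List String) :=
  let dictionary := wordList.foldl pvA_step1 PySem.Dict.empty
  let dictionary := dictionary.keys.foldl (pvA_stepK wordList) dictionary
  dictionary.items

-- ===== PORT B =====
-- 'index.setdefault(c, []).append(w)'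
def pvB_idxC (w : String) (d : PySem.Dict Char (List String)) (c : Char) :
    PySem.Dict Char (List String) :=
  d.modify c [] (· ++ [w])

-- 'for c in dict.fromkeys(w): …'
def pvB_idxW (d : PySem.Dict Char (List String)) (w : String) :
    PySem.Dict Char (List String) :=
  (PySem.List.dedup w.toList).foldl (pvB_idxC w) d

-- build the char -> words index over the distinct words
def pvB_index (words : List String) : PySem.Dict Char (List String) :=
  words.foldl pvB_idxW PySem.Dict.empty

-- 'if w not in seen: seen.add(w); out.append(w)'  (state = (out, seen))
def pvB_stepW (st : List String × PySem.Set String) (w : String) :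
    List String × PySem.Set String :=
  if !(PySem.Set.contains st.2 w) then (st.1 ++ [w], PySem.Set.add st.2 w) else st

-- 'for w in index.get(c, []): …'
def pvB_stepC (index : PySem.Dict Char (List String))
    (st : List String × PySem.Set String) (c : Char) :
    List String × PySem.Set String :=
  (index.getD c []).foldl pvB_stepW st

-- 'out' after walking all chars of key
def pvB_val (index : PySem.Dict Char (List String)) (key : String) : List String :=
  (key.toList.foldl (pvB_stepC index) (([] : List String), PySem.Set.empty)).1

def shareOneLetter_alt (wordList : List String) : List (String × List String) :=
  let words := PySem.List.dedup wordList
  let index := pvB_index words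
  (words.foldl (fun r key => r.insert key (pvB_val index key)) PySem.Dict.empty).items

-- ===== PRECONDITION & SPEC =====
def Spec_shareOneLetter (wordList : List String) (out : List (String × List String)) : Prop := out = shareOneLetter_alt wordList
instance (wordList : List String) (out : List (String × List String)) : Decidable (Spec_shareOneLetter wordList out) := by unfold Spec_shareOneLetter; infer_instance

-- ===== CLAIM (what is proved, stated in full; the proofs are below) =====
def Claim_equal_shareOneLetter : Prop := ∀ (wordList : List String), Dom_shareOneLetter wordList → Spec_shareOneLetter wordList (shareOneLetter wordList)

-- ===== LEMMAS AND PROOFS =====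

-- the common dedup-append step both inner loops reduce to
def pvF (acc : List String) (w : String) : List String :=
  if acc.contains w then acc else acc ++ [w]

-- A's value for one key, as a pure fold
def pvValA (wordList : List String) (key : String) : List String :=
  key.toList.foldl
    (fun acc c => wordList.foldl
      (fun acc w => if w.toList.contains c && !acc.contains w then acc ++ [w] else acc) acc)
    []

-- ---- generic facts about pvF ----

theorem pv_guard_filter (c : Char) (ws : List String) (acc : List String) :
    ws.foldl (fun acc w => if w.toList.contains c && !acc.contains w then acc ++ [w] else acc) acc
      = (ws.filter (fun w => w.toList.contains c)).foldl pvF acc := by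
  induction ws generalizing acc with
  | nil => rfl
  | cons w rest ih =>
    simp only [List.foldl_cons, List.filter_cons]
    have hpv : ∀ a : List String, pvF a w = if a.contains w then a else a ++ [w] :=
      fun a => rfl
    by_cases hc : w.toList.contains c = true
    · by_cases hm : acc.contains w = true
      · simp only [hc, hm, Bool.not_true, Bool.and_false, Bool.false_eq_true, if_false, if_true,
          List.foldl_cons, hpv]
        exact ih acc
      · simp only [hc, eq_false_of_ne_true hm, Bool.not_false, Bool.and_true, if_true,
          List.foldl_cons, hpv, Bool.false_eq_true, if_false]
        exact ih (acc ++ [w])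
    · simp only [eq_false_of_ne_true hc, Bool.false_and, Bool.false_eq_true, if_false]
      exact ih acc

theorem pv_f_char (l : List String) (acc : List String) :
    l.foldl pvF acc = acc ++ (PySem.List.dedup l).filter (fun x => !acc.contains x) := by
  induction l using List.reverseRecOn with
  | nil => simp [PySem.List.dedup]
  | append_singleton l x ih =>
    rw [List.foldl_append, List.foldl_cons, List.foldl_nil, ih]
    simp only [PySem.List.dedup_eq_ofList, PySem.Set.ofList_append_singleton]
    have hml : x ∈ PySem.Set.ofList l ↔ x ∈ l := PySem.Set.mem_ofList _ _
    by_cases hx : x ∈ PySem.Set.ofList l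
    · rw [PySem.Set.add_of_mem hx]
      by_cases ha : x ∈ acc
      · simp [pvF, ha]
      · have hxl : x ∈ l := hml.mp hx
        simp [pvF, ha, hxl, PySem.Set.mem_ofList]
    · rw [PySem.Set.add_of_not_mem hx, List.filter_append]
      have hxl : x ∉ l := fun h => hx (hml.mpr h)
      by_cases ha : x ∈ acc
      · simp [pvF, ha, hxl, PySem.Set.mem_ofList]
      · simp [pvF, ha, hxl, PySem.Set.mem_ofList]

theorem pv_dedup_filter (p : String → Bool) (l : List String) :
    PySem.List.dedup (l.filter p) = (PySem.List.dedup l).filter p := by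
  induction l using List.reverseRecOn with
  | nil => simp [PySem.List.dedup]
  | append_singleton l x ih =>
    simp only [List.filter_append, PySem.List.dedup_eq_ofList] at *
    by_cases hp : p x = true
    · simp only [List.filter_cons, hp, if_true, List.filter_nil, PySem.Set.ofList_append_singleton, ih]
      by_cases hx : x ∈ PySem.Set.ofList l
      · have hx' : x ∈ (PySem.Set.ofList l).filter p := by simp [List.mem_filter, hx, hp]
        rw [PySem.Set.add_of_mem hx, PySem.Set.add_of_mem hx']
      · have hx' : x ∉ (PySem.Set.ofList l).filter p := fun h => hx (List.mem_of_mem_filter h)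
        rw [PySem.Set.add_of_not_mem hx, PySem.Set.add_of_not_mem hx', List.filter_append]
        simp [hp]
    · simp only [List.filter_cons, (by simp [hp] : p x = false), Bool.false_eq_true, if_false,
        List.filter_nil, List.append_nil, ih, PySem.Set.ofList_append_singleton]
      by_cases hx : x ∈ PySem.Set.ofList l
      · rw [PySem.Set.add_of_mem hx]
      · rw [PySem.Set.add_of_not_mem hx, List.filter_append]
        simp [hp]

theorem pv_f_dedup (l : List String) (acc : List String) :
    (PySem.List.dedup l).foldl pvF acc = l.foldl pvF acc := by
  rw [pv_f_char, pv_f_char]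
  simp [PySem.Set.ofList_ofList]


-- ---- A, the dictionary loops ----

theorem pvA1_keys (l : List String) (d : PySem.Dict String (List String)) :
    (l.foldl pvA_step1 d).keys = PySem.Set.update d.keys l := by
  induction l generalizing d with
  | nil => rfl
  | cons w rest ih =>
    rw [List.foldl_cons, PySem.Set.update_cons, ih]
    congr 1
    by_cases h : d.keys.contains w = true
    · have hm : w ∈ d.keys := by simpa using h
      rw [pvA_step1, if_pos h, PySem.Set.add_of_mem hm]
    · have hm : w ∉ d.keys := by simpa using h
      have hc : d.contains w = false := by
        rw [PySem.Dict.contains_eq_decide_mem_keys]; simp [hm]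
      rw [pvA_step1, if_neg h, PySem.Dict.keys_insert_of_not_contains _ _ hc,
        PySem.Set.add_of_not_mem hm]

theorem pvA1_getD (l : List String) (d : PySem.Dict String (List String)) (k : String) :
    (l.foldl pvA_step1 d).getD k [] = d.getD k [] := by
  induction l generalizing d with
  | nil => rfl
  | cons w rest ih =>
    rw [List.foldl_cons, ih]
    by_cases h : d.keys.contains w = true
    · rw [pvA_step1, if_pos h]
    · have hc' : d.contains w = false := by
        rw [PySem.Dict.contains_eq_decide_mem_keys]; simpa using h
      rw [pvA_step1, if_neg h, PySem.Dict.getD_insert]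
      by_cases hk : k = w
      · simp [hk, PySem.Dict.getD_of_not_contains _ _ hc']
      · simp [hk]

theorem pvAW_getD_key (key : String) (char : Char) (ws : List String)
    (d : PySem.Dict String (List String)) :
    (ws.foldl (pvA_stepW key char) d).getD key []
      = ws.foldl (fun acc w => if w.toList.contains char && !acc.contains w then acc ++ [w] else acc)
          (d.getD key []) := by
  induction ws generalizing d with
  | nil => rfl
  | cons w rest ih =>
    rw [List.foldl_cons, List.foldl_cons, ih]
    by_cases h : (w.toList.contains char && !((d.getD key []).contains w)) = true
    · rw [pvA_stepW, if_pos h, PySem.Dict.getD_insert_self, if_pos h]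
    · rw [pvA_stepW, if_neg h, if_neg h]

theorem pvAW_getD_ne (key : String) (char : Char) (ws : List String)
    (d : PySem.Dict String (List String)) (k : String) (h : k ≠ key) :
    (ws.foldl (pvA_stepW key char) d).getD k [] = d.getD k [] := by
  induction ws generalizing d with
  | nil => rfl
  | cons w rest ih =>
    rw [List.foldl_cons, ih]
    by_cases hc : (w.toList.contains char && !((d.getD key []).contains w)) = true
    · rw [pvA_stepW, if_pos hc, PySem.Dict.getD_insert_of_ne _ _ _ h]
    · rw [pvA_stepW, if_neg hc]

theorem pvAW_keys (key : String) (char : Char) (ws : List String)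
    (d : PySem.Dict String (List String)) (h : d.contains key = true) :
    (ws.foldl (pvA_stepW key char) d).keys = d.keys := by
  induction ws generalizing d with
  | nil => rfl
  | cons w rest ih =>
    rw [List.foldl_cons]
    by_cases hc : (w.toList.contains char && !((d.getD key []).contains w)) = true
    · rw [pvA_stepW, if_pos hc,
        ih _ (by rw [PySem.Dict.contains_insert_self]),
        PySem.Dict.keys_insert_of_contains _ _ h]
    · rw [pvA_stepW, if_neg hc, ih _ h]

theorem pvAK_getD_key (wordList : List String) (key : String) (cs : List Char)
    (d : PySem.Dict String (List String)) :
    (cs.foldl (pvA_stepC wordList key) d).getD key []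
      = cs.foldl
          (fun acc c => wordList.foldl
            (fun acc w => if w.toList.contains c && !acc.contains w then acc ++ [w] else acc) acc)
          (d.getD key []) := by
  induction cs generalizing d with
  | nil => rfl
  | cons c rest ih =>
    rw [List.foldl_cons, List.foldl_cons, ih, pvA_stepC, pvAW_getD_key]

theorem pvAK_getD_ne (wordList : List String) (key : String) (cs : List Char)
    (d : PySem.Dict String (List String)) (k : String) (h : k ≠ key) :
    (cs.foldl (pvA_stepC wordList key) d).getD k [] = d.getD k [] := by
  induction cs generalizing d with
  | nil => rfl
  | cons c rest ih =>
    rw [List.foldl_cons, ih, pvA_stepC, pvAW_getD_ne _ _ _ _ _ h]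

theorem pvAK_keys (wordList : List String) (key : String) (cs : List Char)
    (d : PySem.Dict String (List String)) (h : d.contains key = true) :
    (cs.foldl (pvA_stepC wordList key) d).keys = d.keys := by
  induction cs generalizing d with
  | nil => rfl
  | cons c rest ih =>
    rw [List.foldl_cons, pvA_stepC, ih, pvAW_keys _ _ _ _ h]
    rw [PySem.Dict.contains_eq_decide_mem_keys] at h ⊢
    rw [pvAW_keys _ _ _ _ (by rw [PySem.Dict.contains_eq_decide_mem_keys]; exact h)]
    exact h

theorem pvA2_keys (wordList : List String) (ks : List String)
    (d : PySem.Dict String (List String)) (h : ∀ k ∈ ks, d.contains k = true) :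
    (ks.foldl (pvA_stepK wordList) d).keys = d.keys := by
  induction ks generalizing d with
  | nil => rfl
  | cons key rest ih =>
    rw [List.foldl_cons]
    have hkeys : (pvA_stepK wordList d key).keys = d.keys :=
      pvAK_keys _ _ _ _ (h key (by simp))
    rw [ih _ (fun k hk => by
      rw [PySem.Dict.contains_eq_decide_mem_keys, hkeys,
        ← PySem.Dict.contains_eq_decide_mem_keys]
      exact h k (by simp [hk])), hkeys]

theorem pvA2_getD (wordList : List String) (ks : List String)
    (d : PySem.Dict String (List String)) (hnd : ks.Nodup)
    (h : ∀ k ∈ ks, d.contains k = true) (k : String) :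
    (ks.foldl (pvA_stepK wordList) d).getD k []
      = if k ∈ ks then
          k.toList.foldl
            (fun acc c => wordList.foldl
              (fun acc w => if w.toList.contains c && !acc.contains w then acc ++ [w] else acc) acc)
            (d.getD k [])
        else d.getD k [] := by
  induction ks generalizing d with
  | nil => simp
  | cons key rest ih =>
    rw [List.foldl_cons]
    have hkeys : (pvA_stepK wordList d key).keys = d.keys :=
      pvAK_keys _ _ _ _ (h key (by simp))
    have hrest : ∀ k ∈ rest, (pvA_stepK wordList d key).contains k = true := fun k hk => by
      rw [PySem.Dict.contains_eq_decide_mem_keys, hkeys, ← PySem.Dict.contains_eq_decide_mem_keys]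
      exact h k (by simp [hk])
    rw [ih _ (List.Nodup.of_cons hnd) hrest]
    by_cases hk : k ∈ rest
    · have hne : k ≠ key := fun he => (List.nodup_cons.mp hnd).1 (he ▸ hk)
      rw [if_pos hk, if_pos (by simp [hk]), pvA_stepK, pvAK_getD_ne _ _ _ _ _ hne]
    · rw [if_neg hk]
      by_cases hkey : k = key
      · subst hkey
        rw [if_pos (by simp), pvA_stepK, pvAK_getD_key]
      · rw [if_neg (by simp [hk, hkey]), pvA_stepK, pvAK_getD_ne _ _ _ _ _ hkey]


-- ---- B, the index and the per-key walk ----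

theorem pvB_idx_getD_notmem (w : String) (cs : List Char)
    (d : PySem.Dict Char (List String)) (c : Char) (h : c ∉ cs) :
    (cs.foldl (pvB_idxC w) d).getD c [] = d.getD c [] := by
  induction cs generalizing d with
  | nil => rfl
  | cons c' rest ih =>
    rw [List.foldl_cons, ih _ (fun hm => h (by simp [hm])), pvB_idxC,
      PySem.Dict.getD_modify_of_ne _ _ _ (fun he => h (by simp [he]))]

theorem pvB_idx_getD_mem (w : String) (cs : List Char)
    (d : PySem.Dict Char (List String)) (c : Char) (hnd : cs.Nodup) (h : c ∈ cs) :
    (cs.foldl (pvB_idxC w) d).getD c [] = d.getD c [] ++ [w] := by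
  induction cs generalizing d with
  | nil => cases h
  | cons c' rest ih =>
    rw [List.foldl_cons]
    by_cases he : c = c'
    · subst he
      have hnm : c ∉ rest := (List.nodup_cons.mp hnd).1
      rw [pvB_idx_getD_notmem _ _ _ _ hnm, pvB_idxC, PySem.Dict.getD_modify]
      simp
    · exact (ih _ (List.Nodup.of_cons hnd) (by
        rcases List.mem_cons.mp h with h1 | h1
        · exact absurd h1 he
        · exact h1)).trans (by rw [pvB_idxC, PySem.Dict.getD_modify_of_ne _ _ _ he])

theorem pvB_index_getD (ws : List String) (d : PySem.Dict Char (List String)) (c : Char) :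
    (ws.foldl pvB_idxW d).getD c [] = d.getD c [] ++ ws.filter (fun w => w.toList.contains c) := by
  induction ws generalizing d with
  | nil => simp
  | cons w rest ih =>
    rw [List.foldl_cons, ih, List.filter_cons]
    by_cases hc : w.toList.contains c = true
    · have hm : c ∈ PySem.List.dedup w.toList := by
        rw [PySem.List.mem_dedup]; simpa using hc
      rw [hc, if_pos rfl, pvB_idxW,
        pvB_idx_getD_mem _ _ _ _ (PySem.List.nodup_dedup _) hm]
      simp
    · have hm : c ∉ PySem.List.dedup w.toList := by
        rw [PySem.List.mem_dedup]; simpa using hc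
      rw [eq_false_of_ne_true hc, pvB_idxW, pvB_idx_getD_notmem _ _ _ _ hm]
      simp

theorem pvB_pair_stream (l : List String) (out : List String) :
    l.foldl pvB_stepW (out, out) = (l.foldl pvF out, l.foldl pvF out) := by
  induction l generalizing out with
  | nil => rfl
  | cons w rest ih =>
    rw [List.foldl_cons, List.foldl_cons]
    by_cases h : out.contains w = true
    · have hm : w ∈ out := by simpa using h
      rw [pvB_stepW]
      simp only [PySem.Set.contains_eq_listContains]
      rw [h]
      simp only [Bool.not_true, Bool.false_eq_true, if_false]
      rw [ih, pvF, h]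
      simp
    · have hm : w ∉ out := by simpa using h
      rw [pvB_stepW]
      simp only [PySem.Set.contains_eq_listContains]
      rw [eq_false_of_ne_true h]
      simp only [Bool.not_false, if_true]
      rw [PySem.Set.add_of_not_mem hm, ih, pvF, eq_false_of_ne_true h]
      simp

theorem pvB_pair_chars (index : PySem.Dict Char (List String)) (cs : List Char)
    (x : List String) :
    cs.foldl (pvB_stepC index) (x, x)
      = (cs.foldl (fun acc c => (index.getD c []).foldl pvF acc) x,
         cs.foldl (fun acc c => (index.getD c []).foldl pvF acc) x) := by
  induction cs generalizing x with
  | nil => rfl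
  | cons c rest ih =>
    rw [List.foldl_cons, List.foldl_cons, pvB_stepC, pvB_pair_stream, ih]


-- ---- assembling the two sides ----

theorem pv_foldl_congr {α β : Type} (cs : List β) (g h : α → β → α) (x : α)
    (he : ∀ a c, g a c = h a c) : cs.foldl g x = cs.foldl h x := by
  induction cs generalizing x with
  | nil => rfl
  | cons c rest ih => rw [List.foldl_cons, List.foldl_cons, he, ih]

theorem pvA_items (wordList : List String) :
    shareOneLetter wordList
      = (PySem.List.dedup wordList).map (fun k => (k, pvValA wordList k)) := by
  simp only [shareOneLetter]
  have hk1 : (wordList.foldl pvA_step1 PySem.Dict.empty).keys = PySem.List.dedup wordList := by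
    rw [pvA1_keys, PySem.Dict.keys_empty, PySem.Set.update_nil_left, PySem.List.dedup_eq_ofList]
  have hnd : (wordList.foldl pvA_step1 PySem.Dict.empty).keys.Nodup := by
    rw [hk1]; exact PySem.List.nodup_dedup _
  have hall : ∀ k ∈ (wordList.foldl pvA_step1 PySem.Dict.empty).keys,
      (wordList.foldl pvA_step1 PySem.Dict.empty).contains k = true := fun k hk => by
    rw [PySem.Dict.contains_eq_decide_mem_keys]; simp [hk]
  have hk2 := pvA2_keys wordList _ _ hall
  rw [PySem.Dict.items_eq_map_keys _ (by rw [hk2]; exact hnd) ([] : List String), hk2, hk1]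
  apply List.map_congr_left
  intro k hkmem
  have hgd := pvA2_getD wordList _ _ (by rw [hk1]; exact PySem.List.nodup_dedup _) hall k
  rw [if_pos (by rw [hk1]; exact hkmem)] at hgd
  rw [hk1] at hgd
  rw [hgd, pvA1_getD, PySem.Dict.getD_empty, pvValA]

theorem pvB_items (wordList : List String) :
    shareOneLetter_alt wordList
      = (PySem.List.dedup wordList).map
          (fun k => (k, pvB_val (pvB_index (PySem.List.dedup wordList)) k)) := by
  simp only [shareOneLetter_alt]
  rw [PySem.Dict.items_foldl_insert_fresh (PySem.List.dedup wordList) (fun key => key)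
    (fun key => pvB_val (pvB_index (PySem.List.dedup wordList)) key) PySem.Dict.empty
    (fun a _ => PySem.Dict.contains_empty a)
    (by simp)]
  rfl

theorem pv_val_eq (wordList : List String) (k : String) :
    pvValA wordList k = pvB_val (pvB_index (PySem.List.dedup wordList)) k := by
  rw [pvValA, pvB_val]
  have : (([] : List String), PySem.Set.empty) = (([] : List String), ([] : List String)) := rfl
  rw [this, pvB_pair_chars]
  apply pv_foldl_congr
  intro acc c
  rw [pv_guard_filter, pvB_index, pvB_index_getD, PySem.Dict.getD_empty, List.nil_append,
    ← pv_dedup_filter, pv_f_dedup]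

-- ===== VERDICT (by name: the statement is the Claim_ definition above) =====
theorem shareOneLetter_spec : Claim_equal_shareOneLetter := by
  intro wordList _
  unfold Spec_shareOneLetter
  rw [pvA_items, pvB_items]
  exact List.map_congr_left (fun k _ => by rw [pv_val_eq])
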